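-- pv_equiv track=rewrite | github.com/HisMajestytheSquid/Cyclic-Subgroup-count | cyc_subcount.py | elcountlist
-- ===== SOURCE A (Python) =====
-- def lcm(x, y):
--     """lcm returns the leat common multiple of two inputs."""
--     return (x*y) // gcd(x, y)
--
-- def gcd(b, c):
--     """gcd returns the greatest common division of two inputs."""
--     while c:
--         b, c = c, b % c
--     return b
--
-- def rel(v):
--     """
--     rel goes through the defined range and finds the values that have gcd(v,k) = 1, then returns a count of those values
--     for more information about this search the term Euler totient function.
--     """
--     total = 0
--     for a in range(1, v + 1):
--         if gcd(a, v) == 1: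
--             total = total + 1
--     return total
--
-- def listofdiv(v):
--     """takes in an input and lists all of its divisors to include itself in a bracketed list"""
--     return [k for k in range(1, v + 1) if not v % k]
--
-- def elcountlist(v1, v2, v3):
--     listofcases = []
--     list1 = listofdiv(v1)
--     list2 = listofdiv(v2)
--     for s in list1:
--         for t in list2:
--             if lcm(s, t) == v3:
--                 listofcases.append((rel(s)*rel(t)))
--     return listofcases
-- ===== SOURCE B (Python) =====
-- def gcd(b, c):
--     while c:
--         b, c = c, b % c
--     return b
--
-- def elcountlist(v1, v2, v3):
--     def divisors(v):
--         # square-root enumeration: ascending small divisors, cofactors reversed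
--         small = []
--         large = []
--         i = 1
--         while i * i <= v:
--             if v % i == 0:
--                 small.append(i)
--                 q = v // i
--                 if q != i:
--                     large.append(q)
--             i += 1
--         return small + large[::-1]
--
--     cache = {}
--
--     def phi(v):
--         # Euler totient, memoized: computed at most once per distinct divisor
--         if v not in cache:
--             cache[v] = len([a for a in range(1, v + 1) if gcd(a, v) == 1])
--         return cache[v]
--
--     out = []
--     for s in divisors(v1):
--         for t in divisors(v2):
--             if s * t == v3 * gcd(s, t):
--                 out.append(phi(s) * phi(t))
--     return out
-- ===== Notes on version B (the rewrite author's own statement) =====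
-- stated objective: faster
-- what changed: B enumerates divisors by trial division up to sqrt(v) (small divisors ascending plus reversed cofactors) instead of filtering range(1,v+1), tests lcm(s,t)=v3 multiplicatively as s*t == v3*gcd(s,t), and memoizes the naive totient in a dict so it is computed at most once per distinct divisor instead of once per matching pair.
import Mathlib
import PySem

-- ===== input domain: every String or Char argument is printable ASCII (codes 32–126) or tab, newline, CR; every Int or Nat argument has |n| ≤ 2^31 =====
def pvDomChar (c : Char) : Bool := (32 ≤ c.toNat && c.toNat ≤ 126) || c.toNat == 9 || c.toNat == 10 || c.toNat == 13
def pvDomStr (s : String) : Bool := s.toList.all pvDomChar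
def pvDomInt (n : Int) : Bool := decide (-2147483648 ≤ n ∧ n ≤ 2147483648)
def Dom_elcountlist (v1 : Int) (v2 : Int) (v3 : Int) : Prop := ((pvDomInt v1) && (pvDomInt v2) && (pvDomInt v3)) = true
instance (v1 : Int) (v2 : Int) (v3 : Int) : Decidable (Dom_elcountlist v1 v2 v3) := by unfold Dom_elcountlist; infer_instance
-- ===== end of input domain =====

-- B replaces A's linear divisor scan by square-root divisor enumeration, tests lcm(s,t)=v3
-- multiplicatively, and memoizes the totient per distinct divisor instead of recomputing it per pair.

-- ===== PORT A =====
-- termination helper for the Euclidean loop (cited by gcdA/gcdB's decreasing_by)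
theorem pv_mod_natAbs_lt (b c : Int) (hc : c ≠ 0) :
    (PySem.Int.mod b c).natAbs < c.natAbs := by
  rcases lt_or_gt_of_ne hc with h | h
  · have h2 := PySem.Int.mod_neg_bounds (a := b) (b := c) h
    omega
  · have h1 := PySem.Int.mod_nonneg (a := b) (b := c) h
    have h2 := PySem.Int.mod_lt (a := b) (b := c) h
    omega

def gcdA (b c : Int) : Int :=
  if h : c = 0 then b else gcdA c (PySem.Int.mod b c)
termination_by c.natAbs
decreasing_by exact pv_mod_natAbs_lt b c h

def lcmA (x y : Int) : Int := PySem.Int.floordiv (x * y) (gcdA x y)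

def relA (v : Int) : Int :=
  (PySem.List.pyRange 1 (v + 1) 1).foldl
    (fun total a => if gcdA a v == 1 then total + 1 else total) 0

def listofdivA (v : Int) : List Int :=
  (PySem.List.pyRange 1 (v + 1) 1).filter (fun k => PySem.Int.mod v k == 0)

def elcountlist (v1 : Int) (v2 : Int) (v3 : Int) : List Int :=
  let list1 := listofdivA v1
  let list2 := listofdivA v2
  list1.foldl (fun acc s =>
    list2.foldl (fun acc t =>
      if lcmA s t == v3 then acc ++ [relA s * relA t] else acc) acc) []

-- ===== PORT B =====
def gcdB (b c : Int) : Int :=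
  if h : c = 0 then b else gcdB c (PySem.Int.mod b c)
termination_by c.natAbs
decreasing_by exact pv_mod_natAbs_lt b c h

-- termination helper for the sqrt-bounded divisor loop (cited by divAuxB's decreasing_by)
theorem pv_sq_le_imp_le {i v : Int} (h : i * i ≤ v) : i ≤ v := by
  by_cases h0 : i ≤ 0
  · nlinarith [mul_self_nonneg i]
  · nlinarith

-- while i*i <= v: collect small divisors ascending, cofactors in `large`
def divAuxB (v i : Int) (small large : List Int) : List Int :=
  if h : i * i ≤ v then
    if PySem.Int.mod v i == 0 then
      let q := PySem.Int.floordiv v i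
      divAuxB v (i + 1) (small ++ [i]) (if q ≠ i then large ++ [q] else large)
    else
      divAuxB v (i + 1) small large
  else
    small ++ large.reverse      -- small + large[::-1]
termination_by (v + 1 - i).toNat
decreasing_by all_goals (have := pv_sq_le_imp_le h; omega)

def divB (v : Int) : List Int := divAuxB v 1 [] []

def phiB (v : Int) : Int :=
  (((PySem.List.pyRange 1 (v + 1) 1).filter (fun a => gcdB a v == 1)).length : Int)

-- `if v not in cache: cache[v] = …; return cache[v]` — returns (updated cache, value)
def getphiB (c : PySem.Dict Int Int) (v : Int) : PySem.Dict Int Int × Int :=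
  match c.get? v with
  | some p => (c, p)
  | none => let p := phiB v; (c.insert v p, p)

def elcountlist_alt (v1 : Int) (v2 : Int) (v3 : Int) : List Int :=
  let st := (divB v1).foldl (fun st s =>
      (divB v2).foldl (fun st t =>
        if s * t == v3 * gcdB s t then
          let r1 := getphiB st.1 s
          let r2 := getphiB r1.1 t
          (r2.1, st.2 ++ [r1.2 * r2.2])
        else st) st)
    ((PySem.Dict.empty : PySem.Dict Int Int), ([] : List Int))
  st.2

-- ===== PRECONDITION & SPEC =====
def Spec_elcountlist (v1 : Int) (v2 : Int) (v3 : Int) (out : List Int) : Prop := out = elcountlist_alt v1 v2 v3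
instance (v1 : Int) (v2 : Int) (v3 : Int) (out : List Int) : Decidable (Spec_elcountlist v1 v2 v3 out) := by unfold Spec_elcountlist; infer_instance

-- ===== CLAIM (what is proved, stated in full; the proofs are below) =====
def Claim_equal_elcountlist : Prop := ∀ (v1 : Int) (v2 : Int) (v3 : Int), Dom_elcountlist v1 v2 v3 → Spec_elcountlist v1 v2 v3 (elcountlist v1 v2 v3)

-- ===== LEMMAS AND PROOFS =====

-- B's gcd is A's gcd (same Euclidean loop in both sources)
theorem gcdB_eq_gcdA (b c : Int) : gcdB b c = gcdA b c := by
  fun_induction gcdB b c with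
  | case1 => rw [gcdA]; simp
  | case2 b c h ih => rw [gcdA, dif_neg h]; exact ih

-- on nonnegative inputs the loop computes the mathematical gcd
theorem gcdA_eq_gcd (b c : Int) (hb : 0 ≤ b) (hc : 0 ≤ c) :
    gcdA b c = ((Int.gcd b c : Nat) : Int) := by
  induction hn : c.natAbs using Nat.strong_induction_on generalizing b c with
  | _ n ih =>
    by_cases h : c = 0
    · subst h
      rw [gcdA, dif_pos rfl, Int.gcd_def]
      simp
      exact (abs_of_nonneg hb).symm
    · have hcpos : 0 < c := lt_of_le_of_ne hc (Ne.symm h)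
      rw [gcdA, dif_neg h, PySem.Int.mod_eq_emod_of_pos hcpos]
      have hm : 0 ≤ b % c := Int.emod_nonneg b h
      have hlt : (b % c).natAbs < n := by
        have := Int.emod_lt_of_pos b hcpos
        omega
      rw [ih (b % c).natAbs hlt c (b % c) hc hm rfl]
      congr 1
      rw [Int.gcd_def, Int.gcd_def]
      have hb' : b = ((b.natAbs : Nat) : Int) := by omega
      have hc' : c = ((c.natAbs : Nat) : Int) := by omega
      have : (b % c).natAbs = b.natAbs % c.natAbs := by
        rw [hb', hc', ← Int.natCast_emod]
        exact Int.natAbs_natCast _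
      rw [this, Nat.gcd_comm c.natAbs, ← Nat.gcd_rec]
      exact Nat.gcd_comm _ _

theorem foldl_count (p : Int → Bool) (l : List Int) (n : Int) :
    l.foldl (fun t a => if p a then t + 1 else t) n = n + ((l.filter p).length : Int) := by
  induction l generalizing n with
  | nil => simp
  | cons x xs ih =>
    by_cases hx : p x
    · simp [List.foldl, hx, ih]; ring
    · simp [List.foldl, hx, ih]

theorem phiB_eq_relA (v : Int) : phiB v = relA v := by
  unfold phiB relA
  simp only [gcdB_eq_gcdA]
  rw [foldl_count]
  simp

-- the two lcm tests agree on positive s, t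
theorem cond_eq (v3 s t : Int) (hs : 1 ≤ s) (ht : 1 ≤ t) :
    (lcmA s t == v3) = (s * t == v3 * gcdB s t) := by
  rw [gcdB_eq_gcdA]
  have hg : gcdA s t = ((Int.gcd s t : Nat) : Int) := gcdA_eq_gcd s t (by omega) (by omega)
  have hgz : Int.gcd s t ≠ 0 := by
    intro hz
    rw [Int.gcd_eq_zero_iff] at hz
    omega
  have hgpos : 0 < gcdA s t := by
    rw [hg]
    exact_mod_cast Nat.pos_of_ne_zero hgz
  have hdvd : gcdA s t ∣ s := by rw [hg]; exact Int.gcd_dvd_left s t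
  have hdvd2 : gcdA s t ∣ s * t := hdvd.mul_right t
  unfold lcmA
  rw [PySem.Int.floordiv_eq_ediv_of_pos hgpos]
  rw [Bool.eq_iff_iff]
  simp only [beq_iff_eq]
  constructor
  · intro h
    rw [← h]
    exact (Int.ediv_mul_cancel hdvd2).symm
  · intro h
    rw [h]
    exact Int.mul_ediv_cancel _ (ne_of_gt hgpos)

-- small divisors of v from i upwards, ascending
def Sdiv (v i : Int) : List Int :=
  (PySem.List.pyRange i (v + 1) 1).filter
    (fun k => PySem.Int.mod v k == 0 && decide (k * k ≤ v))

-- their cofactors, in the same (ascending-k) order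
def Gdiv (v i : Int) : List Int :=
  ((PySem.List.pyRange i (v + 1) 1).filter
    (fun k => PySem.Int.mod v k == 0 && decide (k * k < v))).map
    (fun k => PySem.Int.floordiv v k)

theorem divAux_inv (v : Int) :
    ∀ (n : Nat) (i : Int) (small large : List Int), (v + 1 - i).toNat = n → 1 ≤ i →
    divAuxB v i small large = small ++ Sdiv v i ++ ((Gdiv v i).reverse ++ large.reverse) := by
  intro n
  induction n using Nat.strong_induction_on with
  | _ n ih =>
    intro i small large hn hi
    by_cases h : i * i ≤ v
    · have hiv : i ≤ v := pv_sq_le_imp_le h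
      have hlt : i < v + 1 := by omega
      have hrange : PySem.List.pyRange i (v + 1) 1 = i :: PySem.List.pyRange (i + 1) (v + 1) 1 :=
        PySem.List.pyRange_one_cons hlt
      have hipos : 0 < i := by omega
      by_cases hd : (PySem.Int.mod v i == 0) = true
      · have hdvd : i ∣ v := (PySem.Int.mod_eq_zero_iff_dvd v i).mp (by simpa using hd)
        have hq : PySem.Int.floordiv v i * i = v := by
          rw [PySem.Int.floordiv_eq_ediv_of_pos hipos]
          exact Int.ediv_mul_cancel hdvd
        have hS : Sdiv v i = i :: Sdiv v (i + 1) := by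
          unfold Sdiv
          rw [hrange, List.filter_cons]
          simp [hd, h]
        rw [divAuxB, dif_pos h, if_pos hd]
        show divAuxB v (i + 1) (small ++ [i])
            (if PySem.Int.floordiv v i ≠ i then large ++ [PySem.Int.floordiv v i] else large)
            = small ++ Sdiv v i ++ ((Gdiv v i).reverse ++ large.reverse)
        by_cases hq2 : i * i < v
        · have hne : PySem.Int.floordiv v i ≠ i := by
            intro he
            rw [he] at hq
            linarith
          have hG : Gdiv v i = PySem.Int.floordiv v i :: Gdiv v (i + 1) := by
            unfold Gdiv
            rw [hrange, List.filter_cons]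
            simp [hd, hq2]
          rw [if_pos hne]
          rw [ih ((v + 1 - (i + 1)).toNat) (by omega) (i + 1) _ _ rfl (by omega)]
          rw [hS, hG]
          simp [List.reverse_append]
        · have hii : i * i = v := le_antisymm h (not_lt.mp hq2)
          have heq : PySem.Int.floordiv v i = i := by
            rw [PySem.Int.floordiv_eq_ediv_of_pos hipos, ← hii]
            exact Int.mul_ediv_cancel_left i (ne_of_gt hipos)
          have hG : Gdiv v i = Gdiv v (i + 1) := by
            unfold Gdiv
            rw [hrange, List.filter_cons]
            simp [hq2]
          rw [if_neg (by simp [heq])]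
          rw [ih ((v + 1 - (i + 1)).toNat) (by omega) (i + 1) _ _ rfl (by omega)]
          rw [hS, hG]
          simp
      · have hd' : (PySem.Int.mod v i == 0) = false := by
          simpa using hd
        have hS : Sdiv v i = Sdiv v (i + 1) := by
          unfold Sdiv
          rw [hrange, List.filter_cons]
          simp [hd']
        have hG : Gdiv v i = Gdiv v (i + 1) := by
          unfold Gdiv
          rw [hrange, List.filter_cons]
          simp [hd']
        rw [divAuxB, dif_pos h, if_neg (by simp [hd'])]
        rw [ih ((v + 1 - (i + 1)).toNat) (by omega) (i + 1) _ _ rfl (by omega), hS, hG]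
    · rw [divAuxB, dif_neg h]
      have hge : ∀ k : Int, k ∈ PySem.List.pyRange i (v + 1) 1 → v < k * k := by
        intro k hk
        have hk' := PySem.List.mem_pyRange_one.mp hk
        nlinarith [hk'.1, hk'.2, not_le.mp h]
      have hS : Sdiv v i = [] := by
        unfold Sdiv
        rw [List.filter_eq_nil_iff]
        intro k hk
        simp only [Bool.and_eq_true, decide_eq_true_eq, not_and]
        intro _ hle
        exact absurd hle (not_le.mpr (hge k hk))
      have hG : Gdiv v i = [] := by
        unfold Gdiv
        have : (PySem.List.pyRange i (v + 1) 1).filter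
            (fun k => PySem.Int.mod v k == 0 && decide (k * k < v)) = [] := by
          rw [List.filter_eq_nil_iff]
          intro k hk
          simp only [Bool.and_eq_true, decide_eq_true_eq, not_and]
          intro _ hlt2
          exact absurd hlt2 (lt_asymm (hge k hk))
        rw [this]
        rfl
      rw [hS, hG]
      simp

-- an ordered list filtered by p splits at a downward-closed secondary predicate q
theorem filter_split (l : List Int) (p q : Int → Bool)
    (hl : l.Pairwise (· < ·))
    (hmono : ∀ x y, x ∈ l → y ∈ l → x ≤ y → q y = true → q x = true) :
    l.filter p = l.filter (fun x => p x && q x) ++ l.filter (fun x => p x && !q x) := by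
  induction l with
  | nil => rfl
  | cons a t ih =>
    have hlt : ∀ y ∈ t, a < y := fun y hy => (List.pairwise_cons.mp hl).1 y hy
    have hl' := (List.pairwise_cons.mp hl).2
    have hmono' : ∀ x y, x ∈ t → y ∈ t → x ≤ y → q y = true → q x = true :=
      fun x y hx hy => hmono x y (by simp [hx]) (by simp [hy])
    by_cases hp : p a = true
    · by_cases hq : q a = true
      · simp [hp, hq, ih hl' hmono']
      · have hqt : ∀ y ∈ t, q y = false := by
          intro y hy
          by_contra hqy
          simp only [Bool.not_eq_false] at hqy
          exact hq (hmono a y (by simp) (by simp [hy]) (le_of_lt (hlt y hy)) hqy)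
        have h1 : t.filter (fun x => p x && q x) = [] := by
          rw [List.filter_eq_nil_iff]
          intro y hy
          simp [hqt y hy]
        have h2 : t.filter (fun x => p x && !q x) = t.filter p := by
          apply List.filter_congr
          intro y hy
          simp [hqt y hy]
        have hq' : q a = false := by simpa using hq
        simp [hp, hq', h1, h2]
    · have hp' : p a = false := by simpa using hp
      simp [hp', ih hl' hmono']

theorem mem_Gdiv (v z : Int) :
    z ∈ Gdiv v 1 ↔ (1 ≤ z ∧ z ≤ v ∧ PySem.Int.mod v z = 0 ∧ v < z * z) := by
  unfold Gdiv
  simp only [List.mem_map, List.mem_filter, PySem.List.mem_pyRange_one, Bool.and_eq_true,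
    beq_iff_eq, decide_eq_true_eq]
  constructor
  · rintro ⟨k, ⟨⟨hk1, hk2⟩, hdk, hkk⟩, rfl⟩
    have hkpos : 0 < k := by omega
    have hdvd : k ∣ v := (PySem.Int.mod_eq_zero_iff_dvd v k).mp hdk
    rw [PySem.Int.floordiv_eq_ediv_of_pos hkpos]
    have hmul : v / k * k = v := Int.ediv_mul_cancel hdvd
    have hv1 : 1 ≤ v := by omega
    have hz1 : 1 ≤ v / k := by nlinarith [hmul]
    refine ⟨hz1, ?_, ?_, ?_⟩
    · nlinarith [hmul]
    · rw [PySem.Int.mod_eq_zero_iff_dvd]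
      exact ⟨k, hmul.symm⟩
    · nlinarith [hmul, mul_self_nonneg (v / k - k)]
  · rintro ⟨hz1, hzv, hdz, hzz⟩
    have hzpos : 0 < z := by omega
    have hdvd : z ∣ v := (PySem.Int.mod_eq_zero_iff_dvd v z).mp hdz
    have hmul : v / z * z = v := Int.ediv_mul_cancel hdvd
    have hv1 : 1 ≤ v := by omega
    have hk1 : 1 ≤ v / z := by nlinarith [hmul]
    have hkz : v / z * z = v := hmul
    refine ⟨v / z, ⟨⟨hk1, ?_⟩, ?_, ?_⟩, ?_⟩
    · nlinarith [hmul]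
    · rw [PySem.Int.mod_eq_zero_iff_dvd]
      exact ⟨z, hmul.symm⟩
    · nlinarith [hmul, hzz, hzpos, hk1]
    · have hkpos : 0 < v / z := by omega
      rw [PySem.Int.floordiv_eq_ediv_of_pos hkpos]
      have hvz : v / z * z = v := hmul
      calc v / (v / z) = (v / z * z) / (v / z) := by rw [hvz]
        _ = z := by rw [mul_comm, Int.mul_ediv_cancel _ (ne_of_gt hkpos)]

theorem divB_eq_listofdivA (v : Int) : divB v = listofdivA v := by
  unfold divB
  rw [divAux_inv v ((v + 1 - 1).toNat) 1 [] [] rfl le_rfl]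
  simp only [List.nil_append, List.reverse_nil, List.append_nil]
  unfold listofdivA
  rw [filter_split (PySem.List.pyRange 1 (v + 1) 1) (fun k => PySem.Int.mod v k == 0)
      (fun k => decide (k * k ≤ v)) (PySem.List.pairwise_lt_pyRange_one 1 (v + 1))
      (by
        intro x y hx hy hxy hqy
        have hx1 := (PySem.List.mem_pyRange_one.mp hx).1
        simp only [decide_eq_true_eq] at hqy ⊢
        nlinarith)]
  congr 1
  have hR : ((PySem.List.pyRange 1 (v + 1) 1).filter
      (fun x => PySem.Int.mod v x == 0 && !decide (x * x ≤ v))).Pairwise (· < ·) :=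
    (PySem.List.pairwise_lt_pyRange_one 1 (v + 1)).filter _
  have hGpair : (Gdiv v 1).Pairwise (fun a b => b < a) := by
    unfold Gdiv
    rw [List.pairwise_map]
    refine List.Pairwise.imp_of_mem ?_
      ((PySem.List.pairwise_lt_pyRange_one 1 (v + 1)).filter _)
    intro a b ha hb hab
    have ha' := List.mem_filter.mp ha
    have hb' := List.mem_filter.mp hb
    have ha1 := (PySem.List.mem_pyRange_one.mp ha'.1).1
    have hb1 := (PySem.List.mem_pyRange_one.mp hb'.1).1
    have hbv := (PySem.List.mem_pyRange_one.mp hb'.1).2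
    have hda : PySem.Int.mod v a = 0 := by
      have := ha'.2; simp only [Bool.and_eq_true, beq_iff_eq] at this; exact this.1
    have hdb : PySem.Int.mod v b = 0 := by
      have := hb'.2; simp only [Bool.and_eq_true, beq_iff_eq] at this; exact this.1
    have hapos : (0 : Int) < a := by omega
    have hbpos : (0 : Int) < b := by omega
    have hmula : v / a * a = v :=
      Int.ediv_mul_cancel ((PySem.Int.mod_eq_zero_iff_dvd v a).mp hda)
    have hmulb : v / b * b = v :=
      Int.ediv_mul_cancel ((PySem.Int.mod_eq_zero_iff_dvd v b).mp hdb)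
    have hv1 : 1 ≤ v := by omega
    have hy1 : 1 ≤ v / b := by nlinarith [hmulb]
    rw [PySem.Int.floordiv_eq_ediv_of_pos hapos, PySem.Int.floordiv_eq_ediv_of_pos hbpos]
    nlinarith [hmula, hmulb]
  have hL : ((Gdiv v 1).reverse).Pairwise (· < ·) := by
    rw [List.pairwise_reverse]
    exact hGpair
  have ndL : ((Gdiv v 1).reverse).Nodup := hL.imp (fun h => ne_of_lt h)
  have ndR : ((PySem.List.pyRange 1 (v + 1) 1).filter
      (fun x => PySem.Int.mod v x == 0 && !decide (x * x ≤ v))).Nodup :=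
    hR.imp (fun h => ne_of_lt h)
  have hperm : ((Gdiv v 1).reverse).Perm ((PySem.List.pyRange 1 (v + 1) 1).filter
      (fun x => PySem.Int.mod v x == 0 && !decide (x * x ≤ v))) := by
    rw [List.perm_ext_iff_of_nodup ndL ndR]
    intro z
    rw [List.mem_reverse, mem_Gdiv]
    simp only [List.mem_filter, PySem.List.mem_pyRange_one, Bool.and_eq_true, beq_iff_eq,
      Bool.not_eq_true', decide_eq_false_iff_not, not_le]
    constructor
    · rintro ⟨h1, h2, h3, h4⟩
      exact ⟨⟨h1, by omega⟩, h3, h4⟩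
    · rintro ⟨⟨h1, h2⟩, h3, h4⟩
      exact ⟨h1, by omega, h3, h4⟩
  exact List.Perm.eq_of_pairwise (fun a b _ _ h1 h2 => le_antisymm h1 h2) (hL.imp (fun h => le_of_lt h)) (hR.imp (fun h => le_of_lt h)) hperm

theorem mem_listofdivA (v k : Int) (h : k ∈ listofdivA v) : 1 ≤ k := by
  unfold listofdivA at h
  have := (List.mem_filter.mp h).1
  exact (PySem.List.mem_pyRange_one.mp this).1

-- cache invariant: every stored value is the totient of its key
def InvC (c : PySem.Dict Int Int) : Prop := ∀ k p, c.get? k = some p → p = phiB k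

theorem getphi_val (c : PySem.Dict Int Int) (hc : InvC c) (v : Int) :
    (getphiB c v).2 = phiB v := by
  unfold getphiB
  cases h : c.get? v with
  | none => rfl
  | some p => exact hc v p h

theorem getphi_inv (c : PySem.Dict Int Int) (hc : InvC c) (v : Int) :
    InvC (getphiB c v).1 := by
  unfold getphiB
  cases h : c.get? v with
  | none =>
    intro k p hk
    rw [PySem.Dict.get?_insert] at hk
    by_cases hkv : k = v
    · subst hkv; simp at hk; omega
    · rw [if_neg hkv] at hk; exact hc k p hk
  | some p => exact hc

theorem inner_eq (v3 s : Int) (hs : 1 ≤ s) (l2 : List Int) (ht : ∀ t ∈ l2, 1 ≤ t)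
    (c : PySem.Dict Int Int) (acc : List Int) (hc : InvC c) :
    (l2.foldl (fun st t =>
        if s * t == v3 * gcdB s t then
          let r1 := getphiB st.1 s
          let r2 := getphiB r1.1 t
          (r2.1, st.2 ++ [r1.2 * r2.2])
        else st) (c, acc)).2
      = l2.foldl (fun a t =>
          if lcmA s t == v3 then a ++ [relA s * relA t] else a) acc
    ∧ InvC (l2.foldl (fun st t =>
        if s * t == v3 * gcdB s t then
          let r1 := getphiB st.1 s
          let r2 := getphiB r1.1 t
          (r2.1, st.2 ++ [r1.2 * r2.2])
        else st) (c, acc)).1 := by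
  induction l2 generalizing c acc with
  | nil => exact ⟨rfl, hc⟩
  | cons t ts ih =>
    have ht1 : 1 ≤ t := ht t (by simp)
    have hts : ∀ x ∈ ts, 1 ≤ x := fun x hx => ht x (by simp [hx])
    have hcond := cond_eq v3 s t hs ht1
    simp only [List.foldl, ← hcond]
    by_cases hif : (lcmA s t == v3) = true
    · simp only [hif, if_true]
      have h1 := getphi_val c hc s
      have hi1 := getphi_inv c hc s
      have h2 := getphi_val _ hi1 t
      have hi2 := getphi_inv _ hi1 t
      rw [h1, h2]
      have hrel : phiB s * phiB t = relA s * relA t := by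
        rw [phiB_eq_relA, phiB_eq_relA]
      rw [hrel]
      exact ih hts _ _ hi2
    · simp only [Bool.not_eq_true] at hif
      simp only [hif, Bool.false_eq_true, if_false]
      exact ih hts _ _ hc

theorem outer_eq (v3 : Int) (l1 l2 : List Int) (hs : ∀ s ∈ l1, 1 ≤ s) (ht : ∀ t ∈ l2, 1 ≤ t)
    (c : PySem.Dict Int Int) (acc : List Int) (hc : InvC c) :
    (l1.foldl (fun st s =>
        l2.foldl (fun st t =>
          if s * t == v3 * gcdB s t then
            let r1 := getphiB st.1 s
            let r2 := getphiB r1.1 t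
            (r2.1, st.2 ++ [r1.2 * r2.2])
          else st) st) (c, acc)).2
      = l1.foldl (fun acc s =>
          l2.foldl (fun acc t =>
            if lcmA s t == v3 then acc ++ [relA s * relA t] else acc) acc) acc := by
  induction l1 generalizing c acc with
  | nil => rfl
  | cons s ss ih =>
    have hs1 : 1 ≤ s := hs s (by simp)
    have hss : ∀ x ∈ ss, 1 ≤ x := fun x hx => hs x (by simp [hx])
    simp only [List.foldl]
    obtain ⟨e2, einv⟩ := inner_eq v3 s hs1 l2 ht c acc hc
    have hsplit : (l2.foldl (fun st t =>
        if s * t == v3 * gcdB s t then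
          let r1 := getphiB st.1 s
          let r2 := getphiB r1.1 t
          (r2.1, st.2 ++ [r1.2 * r2.2])
        else st) (c, acc))
      = ((l2.foldl (fun st t =>
        if s * t == v3 * gcdB s t then
          let r1 := getphiB st.1 s
          let r2 := getphiB r1.1 t
          (r2.1, st.2 ++ [r1.2 * r2.2])
        else st) (c, acc)).1,
        l2.foldl (fun a t =>
          if lcmA s t == v3 then a ++ [relA s * relA t] else a) acc) := by
      rw [← e2]
    rw [hsplit]
    exact ih hss _ _ einv

-- ===== VERDICT (by name: the statement is the Claim_ definition above) =====
theorem elcountlist_spec : Claim_equal_elcountlist := by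
  intro v1 v2 v3 _
  unfold Spec_elcountlist elcountlist elcountlist_alt
  rw [divB_eq_listofdivA, divB_eq_listofdivA]
  exact (outer_eq v3 (listofdivA v1) (listofdivA v2)
    (fun s hs => mem_listofdivA v1 s hs) (fun t ht => mem_listofdivA v2 t ht)
    PySem.Dict.empty [] (fun k p h => by simp [PySem.Dict.get?_empty] at h)).symm
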